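-- pv_equiv track=rewrite | github.com/hsherkat/AOC2020 | day21.py | part_1
-- ===== SOURCE A (Python) =====
-- from typing import Tuple, List, Dict, Union, Set
--
-- def part_1(
--     potential_sources: Dict[str, Set[str]], all_ingredients: Set[str], raw_input: str
-- ) -> int:
--     possible_bad_ingredients = set.union(*potential_sources.values())
--     good_ingredients = set(
--         [food for food in all_ingredients if food not in possible_bad_ingredients]
--     )
--     good_count = sum(
--         line.split().count(good)
--         for line in raw_input.split("\n")
--         for good in good_ingredients
--     )
--     return good_count
-- ===== SOURCE B (Python) =====
-- def part_1(potential_sources, all_ingredients, raw_input):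
--     total = 0
--     for line in raw_input.split("\n"):
--         for word in line.split():
--             if word in all_ingredients and not any(
--                 word in bad for bad in potential_sources.values()
--             ):
--                 total += 1
--     return total
-- ===== Notes on version B (the rewrite author's own statement) =====
-- stated objective: faster
-- what changed: Instead of A's staged set construction (union of all sources, good-ingredient set, then a nested sum rescanning each line once per good ingredient), B makes one pass over the words of the input and increments a counter whenever the word is a known ingredient that occurs in no allergen's source set.
import Mathlib
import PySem

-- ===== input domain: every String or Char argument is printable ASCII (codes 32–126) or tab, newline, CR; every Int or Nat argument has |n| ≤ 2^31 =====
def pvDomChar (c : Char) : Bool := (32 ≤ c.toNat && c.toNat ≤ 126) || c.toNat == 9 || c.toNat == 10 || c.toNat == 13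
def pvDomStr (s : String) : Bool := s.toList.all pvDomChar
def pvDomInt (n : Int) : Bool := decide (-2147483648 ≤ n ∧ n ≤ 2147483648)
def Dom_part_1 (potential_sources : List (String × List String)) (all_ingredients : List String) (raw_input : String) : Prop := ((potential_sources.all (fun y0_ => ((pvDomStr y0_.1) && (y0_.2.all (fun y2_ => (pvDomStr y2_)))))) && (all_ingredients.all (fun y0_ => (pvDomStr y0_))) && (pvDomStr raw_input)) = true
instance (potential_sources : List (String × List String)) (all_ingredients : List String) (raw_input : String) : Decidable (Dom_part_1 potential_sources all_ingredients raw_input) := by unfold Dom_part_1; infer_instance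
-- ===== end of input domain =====

-- ===== PORT A =====
-- B replaces A's staged set construction plus nested per-(line, good-ingredient) rescans with one
-- pass over the words and a per-word membership test; same value on Pre_ (alternative decomposition).
-- A, step for step: set.union(*potential_sources.values()) (the [] branch is unreachable under
-- Pre_: Python raises TypeError there), then the good-ingredient set, then the nested generator sum.
def pvUnionAll (potential_sources : List (String × List String)) : List String :=
  match potential_sources.map Prod.snd with
  | [] => []
  | v :: rest => rest.foldl (fun acc w => PySem.Set.union acc w) (PySem.Set.ofList v)

def pvGood (potential_sources : List (String × List String)) (all_ingredients : List String) : List String :=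
  PySem.Set.ofList ((PySem.Set.ofList all_ingredients).filter
    (fun food => !(PySem.Set.contains (pvUnionAll potential_sources) food)))

-- split? with the literal separator "\n" is always `some` (sep nonempty), so .getD [] is exact
def part_1 (potential_sources : List (String × List String)) (all_ingredients : List String) (raw_input : String) : Int :=
  (((PySem.Str.split? raw_input "
").getD []).map (fun line =>
    ((pvGood potential_sources all_ingredients).map (fun good =>
      (PySem.List.count (PySem.Str.split₀ line) good : Int))).sum)).sum

-- ===== PORT B =====
-- B's loops verbatim: for line / for word, one Int accumulator; 'word in all_ingredients' and
-- 'word in bad' are membership in the distinct-element lists, 'any(...)' over the dict's values.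
def part_1_alt (potential_sources : List (String × List String)) (all_ingredients : List String) (raw_input : String) : Int :=
  ((PySem.Str.split? raw_input "
").getD []).foldl (fun total line =>
    (PySem.Str.split₀ line).foldl (fun t word =>
      if all_ingredients.contains word
          && !(potential_sources.any (fun kv => kv.2.contains word)) then t + 1 else t) total) 0

-- ===== PRECONDITION & SPEC =====
-- Pre_ excludes empty potential_sources, where Python's set.union(*potential_sources.values()) raises TypeError in A.
def Pre_part_1 (potential_sources : List (String × List String)) (all_ingredients : List String) (raw_input : String) : Prop :=
  potential_sources ≠ []
instance (potential_sources : List (String × List String)) (all_ingredients : List String) (raw_input : String) : Decidable (Pre_part_1 potential_sources all_ingredients raw_input) := by unfold Pre_part_1; infer_instance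

def pvWitness_part_1 : (List (String × List String)) × List String × String :=
  ([("dairy", ["x"])], ["a", "x"], "a x\na")

def Spec_part_1 (potential_sources : List (String × List String)) (all_ingredients : List String) (raw_input : String) (out : Int) : Prop := out = part_1_alt potential_sources all_ingredients raw_input
instance (potential_sources : List (String × List String)) (all_ingredients : List String) (raw_input : String) (out : Int) : Decidable (Spec_part_1 potential_sources all_ingredients raw_input out) := by unfold Spec_part_1; infer_instance

-- ===== CLAIM (what is proved, stated in full; the proofs are below) =====
def Claim_equal_part_1 : Prop := ∀ (potential_sources : List (String × List String)) (all_ingredients : List String) (raw_input : String), Dom_part_1 potential_sources all_ingredients raw_input → Pre_part_1 potential_sources all_ingredients raw_input → Spec_part_1 potential_sources all_ingredients raw_input (part_1 potential_sources all_ingredients raw_input)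


-- ===== LEMMAS AND PROOFS =====
-- membership in the foldl of unions = membership in the seed or in a later set
theorem pvMemFoldlUnion (rest : List (List String)) (acc : List String) (w : String) :
    w ∈ rest.foldl (fun acc u => PySem.Set.union acc u) acc ↔ w ∈ acc ∨ ∃ u ∈ rest, w ∈ u := by
  induction rest generalizing acc with
  | nil => simp
  | cons u t ih => simp [ih, PySem.Set.mem_union, or_assoc]

-- A's good-ingredient set has exactly the members B's per-word test accepts
theorem pvMemGood (ps : List (String × List String)) (ai : List String) (w : String) :
    w ∈ pvGood ps ai ↔ (ai.contains w && !(ps.any (fun kv => kv.2.contains w))) = true := by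
  unfold pvGood pvUnionAll
  cases ps with
  | nil =>
      simp [PySem.Set.mem_ofList, PySem.Set.contains]
  | cons kv t =>
      simp only [List.map_cons]
      simp [PySem.Set.mem_ofList, PySem.Set.contains, pvMemFoldlUnion, List.mem_map]
      tauto

-- with G nodup, the sum over g ∈ G of the indicator (g = w) is the membership indicator
theorem pvSumIndicator (G : List String) (hG : G.Nodup) (w : String) :
    (G.map (fun g => if g = w then (1 : Int) else 0)).sum = if w ∈ G then 1 else 0 := by
  induction G with
  | nil => simp
  | cons g t ih =>
      simp only [List.nodup_cons] at hG
      by_cases hgw : g = w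
      · subst hgw
        simp [hG.1, ih hG.2]
      · simp [hgw, ih hG.2, Ne.symm hgw]

-- with G nodup, summing per-good occurrence counts over a line = counting tokens that lie in G
theorem pvSumCounts (G : List String) (hG : G.Nodup) (ts : List String) :
    (G.map (fun g => (PySem.List.count ts g : Int))).sum = (ts.countP (fun w => decide (w ∈ G)) : Int) := by
  induction ts with
  | nil => simp [PySem.List.count]
  | cons w ts ih =>
      have hcount : ∀ g : String, (PySem.List.count (w :: ts) g : Int)
          = (if g = w then (1 : Int) else 0) + PySem.List.count ts g := by
        intro g
        by_cases h : g = w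
        · subst h; simp [PySem.List.count, List.count_cons]; ring
        · simp [PySem.List.count, List.count_cons, h, Ne.symm h]
      simp only [hcount]
      rw [List.countP_cons]
      rw [PySem.List.sum_map_add_int, pvSumIndicator G hG w, ih]
      by_cases h : w ∈ G <;> simp [h]
      ring

-- B's nested counting loop = the sum of per-line countP's
theorem pvFoldlNested (P : String → Bool) (L : List String) (a : Int) :
    L.foldl (fun total line => (PySem.Str.split₀ line).foldl
        (fun t word => if P word then t + 1 else t) total) a
      = a + (L.map (fun line => ((PySem.Str.split₀ line).countP P : Int))).sum := by
  induction L generalizing a with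
  | nil => simp
  | cons l t ih =>
      rw [List.foldl_cons, PySem.List.foldl_if_add_one, ih]
      simp only [List.map_cons, List.sum_cons]
      ring

-- ===== VERDICT (by name: the statement is the Claim_ definition above) =====
theorem part_1_spec : Claim_equal_part_1 := by
  intro ps ai raw _ _
  unfold Spec_part_1 part_1 part_1_alt
  have hG : (pvGood ps ai).Nodup := PySem.Set.nodup_ofList _
  rw [pvFoldlNested]
  simp only [zero_add]
  apply congrArg List.sum
  apply List.map_congr_left
  intro line _
  rw [pvSumCounts _ hG]
  congr 1
  apply List.countP_congr
  intro w _
  simp [pvMemGood]
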